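-- pv_equiv track=rewrite | github.com/leungkcofficial/tarot-train | webapp/backend/app/core/validation.py | calculate_cci_score
-- ===== SOURCE A (Python) =====
-- from typing import Dict, Tuple, Optional, Any, List, Union
--
-- def calculate_cci_score(comorbidities: Dict[str, bool]) -> int:
--     """
--     Calculate Charlson Comorbidity Index score
--
--     Args:
--         comorbidities: Dictionary of comorbidity flags
--
--     Returns:
--         CCI score
--     """
--     # CCI scoring weights
--     cci_weights = {
--         "myocardial_infarction": 1,
--         "congestive_heart_failure": 1,
--         "peripheral_vascular_disease": 1,
--         "cerebrovascular_disease": 1,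
--         "dementia": 1,
--         "chronic_pulmonary_disease": 1,
--         "rheumatic_disease": 1,
--         "peptic_ulcer_disease": 1,
--         "mild_liver_disease": 1,
--         "diabetes_wo_complication": 1,
--         "renal_mild_moderate": 2,
--         "diabetes_w_complication": 2,
--         "hemiplegia_paraplegia": 2,
--         "any_malignancy": 2,
--         "liver_severe": 3,
--         "renal_severe": 3,
--         "metastatic_cancer": 6,
--         "hiv": 6,
--         "aids": 6
--     }
--
--     score = 0
--     for condition, present in comorbidities.items():
--         if present and condition in cci_weights:
--             score += cci_weights[condition]
--
--     return score
-- ===== SOURCE B (Python) =====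
-- def calculate_cci_score(comorbidities):
--     """
--     Calculate Charlson Comorbidity Index score
--
--     Args:
--         comorbidities: Dictionary of comorbidity flags
--
--     Returns:
--         CCI score
--     """
--     # Conditions grouped by their CCI weight: score = sum of weight * (# present)
--     weight_groups = [
--         (1, ["myocardial_infarction", "congestive_heart_failure",
--              "peripheral_vascular_disease", "cerebrovascular_disease",
--              "dementia", "chronic_pulmonary_disease", "rheumatic_disease",
--              "peptic_ulcer_disease", "mild_liver_disease",
--              "diabetes_wo_complication"]),
--         (2, ["renal_mild_moderate", "diabetes_w_complication",
--              "hemiplegia_paraplegia", "any_malignancy"]),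
--         (3, ["liver_severe", "renal_severe"]),
--         (6, ["metastatic_cancer", "hiv", "aids"]),
--     ]
--     score = 0
--     for weight, names in weight_groups:
--         score += weight * sum(1 for name in names if comorbidities.get(name))
--     return score
-- ===== Notes on version B (the rewrite author's own statement) =====
-- stated objective: alternative
-- what changed: B replaces A's loop over the caller's dict with a weight-bucketed computation: conditions are grouped by weight into four fixed lists and the score is the sum over groups of weight times the count of conditions whose flag is truthy in the input, looked up via dict.get; the input is only probed, never iterated.
import Mathlib
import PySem

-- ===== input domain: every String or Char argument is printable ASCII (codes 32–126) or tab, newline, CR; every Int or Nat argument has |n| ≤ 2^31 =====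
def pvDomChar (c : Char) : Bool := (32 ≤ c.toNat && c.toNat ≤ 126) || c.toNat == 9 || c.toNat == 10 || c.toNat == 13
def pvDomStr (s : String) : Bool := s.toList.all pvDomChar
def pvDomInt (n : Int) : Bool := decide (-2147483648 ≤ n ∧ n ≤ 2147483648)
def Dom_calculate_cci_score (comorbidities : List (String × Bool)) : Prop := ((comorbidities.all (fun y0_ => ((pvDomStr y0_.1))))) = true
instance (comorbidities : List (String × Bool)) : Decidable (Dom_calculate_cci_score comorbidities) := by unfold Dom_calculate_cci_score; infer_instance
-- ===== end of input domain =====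

-- B scores by weight buckets (weight * count of truthy flags per fixed group, probed via
-- dict.get) instead of A's loop over the input dict with a weights-table membership test.


-- ===== PORT A =====
-- A's literal weights dict (distinct keys, insertion order)
def cciWeights : List (String × Int) :=
  [("myocardial_infarction", 1), ("congestive_heart_failure", 1),
   ("peripheral_vascular_disease", 1), ("cerebrovascular_disease", 1),
   ("dementia", 1), ("chronic_pulmonary_disease", 1), ("rheumatic_disease", 1),
   ("peptic_ulcer_disease", 1), ("mild_liver_disease", 1),
   ("diabetes_wo_complication", 1), ("renal_mild_moderate", 2),
   ("diabetes_w_complication", 2), ("hemiplegia_paraplegia", 2),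
   ("any_malignancy", 2), ("liver_severe", 3), ("renal_severe", 3),
   ("metastatic_cancer", 6), ("hiv", 6), ("aids", 6)]

def cciDict : PySem.Dict String Int := PySem.Dict.mk cciWeights

-- A: for condition, present in comorbidities.items(): if present and condition in cci_weights: score += cci_weights[condition]
def calculate_cci_score (comorbidities : List (String × Bool)) : Int :=
  comorbidities.foldl
    (fun score p =>
      if p.2 && cciDict.contains p.1 then score + cciDict.getD p.1 0 else score)
    0

-- ===== PORT B =====
-- B's literal weight_groups table: each weight with the list of conditions carrying it
def cciGroups : List (Int × List String) :=
  [(1, ["myocardial_infarction", "congestive_heart_failure",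
        "peripheral_vascular_disease", "cerebrovascular_disease",
        "dementia", "chronic_pulmonary_disease", "rheumatic_disease",
        "peptic_ulcer_disease", "mild_liver_disease",
        "diabetes_wo_complication"]),
   (2, ["renal_mild_moderate", "diabetes_w_complication",
        "hemiplegia_paraplegia", "any_malignancy"]),
   (3, ["liver_severe", "renal_severe"]),
   (6, ["metastatic_cancer", "hiv", "aids"])]

-- B: for weight, names in weight_groups: score += weight * sum(1 for name in names if comorbidities.get(name))
def calculate_cci_score_alt (comorbidities : List (String × Bool)) : Int :=
  cciGroups.foldl
    (fun score g =>
      score + g.1 * ((g.2.countP (fun name => (PySem.Dict.mk comorbidities).getD name false) : Nat) : Int))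
    0

-- ===== PRECONDITION & SPEC =====
-- Pre_ only requires distinct keys: the list stands for a Python dict, which cannot
-- contain duplicate keys, so no input A actually accepts is excluded.
def Pre_calculate_cci_score (comorbidities : List (String × Bool)) : Prop :=
  (comorbidities.map Prod.fst).Nodup
instance (comorbidities : List (String × Bool)) : Decidable (Pre_calculate_cci_score comorbidities) := by unfold Pre_calculate_cci_score; infer_instance

def pvWitness_calculate_cci_score : (List (String × Bool)) := [("dementia", true), ("hiv", false)]

def Spec_calculate_cci_score (comorbidities : List (String × Bool)) (out : Int) : Prop := out = calculate_cci_score_alt comorbidities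
instance (comorbidities : List (String × Bool)) (out : Int) : Decidable (Spec_calculate_cci_score comorbidities out) := by unfold Spec_calculate_cci_score; infer_instance

-- ===== CLAIM (what is proved, stated in full; the proofs are below) =====
def Claim_equal_calculate_cci_score : Prop := ∀ (comorbidities : List (String × Bool)), Dom_calculate_cci_score comorbidities → Pre_calculate_cci_score comorbidities → Spec_calculate_cci_score comorbidities (calculate_cci_score comorbidities)

-- ===== LEMMAS AND PROOFS =====

-- A's fold as a sum over the input list
theorem calcA_eq_sum (cs : List (String × Bool)) :
    calculate_cci_score cs =
      (cs.map (fun p => if p.2 && cciDict.contains p.1 then cciDict.getD p.1 0 else 0)).sum := by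
  unfold calculate_cci_score
  have h : (fun (score : Int) (p : String × Bool) =>
      if p.2 && cciDict.contains p.1 then score + cciDict.getD p.1 0 else score)
      = (fun score p =>
      score + (if p.2 && cciDict.contains p.1 then cciDict.getD p.1 0 else 0)) := by
    funext s p; split <;> simp
  rw [h, PySem.List.foldl_add]
  simp

-- a truthy-count over strings as an Int-valued sum of indicators
theorem countP_eq_indicator_sum (p : String → Bool) :
    ∀ (g : List String),
      ((g.countP p : Nat) : Int) = (g.map (fun n => if p n then (1 : Int) else 0)).sum := by
  intro g
  induction g with
  | nil => simp
  | cons a l ih =>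
    by_cases hp : p a <;> simp [hp, ih] <;> ring

-- B equals the same sum taken over A's weights table
theorem calcB_eq_sum (cs : List (String × Bool)) :
    calculate_cci_score_alt cs =
      (cciWeights.map
        (fun q => if (PySem.Dict.mk cs).getD q.1 false then q.2 else 0)).sum := by
  unfold calculate_cci_score_alt
  simp only [cciGroups, List.foldl_cons, List.foldl_nil,
    countP_eq_indicator_sum,
    List.map_cons, List.map_nil, List.sum_cons, List.sum_nil, cciWeights]
  simp only [mul_add, mul_ite, mul_one, add_zero, mul_comm]
  ring_nf

-- splitting one key out of a sum over a nodup-key table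
theorem sum_key_split (k : String) (f : Int → Int) :
    ∀ (W : List (String × Int)), (W.map Prod.fst).Nodup →
    ∀ (g : String × Int → Int), (∀ q ∈ W, q.1 = k → g q = 0) →
    (W.map (fun q => if k = q.1 then f q.2 else g q)).sum
      = (W.map g).sum
        + (if (PySem.Dict.mk W).contains k then f ((PySem.Dict.mk W).getD k 0) else 0) := by
  intro W
  induction W with
  | nil => intro _ g _; simp [PySem.Dict.contains]
  | cons p W ih =>
    obtain ⟨pk, pv⟩ := p
    intro hnd g hg
    simp only [List.map_cons, List.nodup_cons, List.mem_map] at hnd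
    by_cases hk : k = pk
    · subst hk
      have hWg : W.map (fun q => if k = q.1 then f q.2 else g q) = W.map g := by
        apply List.map_congr_left
        intro q hq
        have : ¬ k = q.1 := by
          intro he; exact hnd.1 ⟨q, hq, he.symm⟩
        simp [this]
      have hgp : g (k, pv) = 0 := hg (k, pv) (List.mem_cons_self) rfl
      have hget : (PySem.Dict.mk ((k, pv) :: W)).get? k = some pv := by
        rw [PySem.Dict.get?_mk_cons]; simp
      simp only [List.map_cons, List.sum_cons, hWg, hgp,
        PySem.Dict.contains_eq_isSome_get?, hget, PySem.Dict.getD_eq_get?_getD]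
      simp
      ring
    · have ihW := ih hnd.2 g (fun q hq => hg q (List.mem_cons_of_mem _ hq))
      have hne : (pk == k) = false := by
        simpa using fun he => hk he.symm
      have hget : (PySem.Dict.mk ((pk, pv) :: W)).get? k = (PySem.Dict.mk W).get? k := by
        rw [PySem.Dict.get?_mk_cons, hne]; simp
      have hfk : ¬ k = pk := hk
      simp only [List.map_cons, List.sum_cons, if_neg hfk, ihW,
        PySem.Dict.contains_eq_isSome_get?, hget, PySem.Dict.getD_eq_get?_getD]
      ring

-- the common sum form (proof-side abbreviation of what both ports compute)
theorem main_equiv (cs : List (String × Bool)) (hnd : (cs.map Prod.fst).Nodup) :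
    calculate_cci_score cs =
      (cciWeights.map
        (fun q => if (PySem.Dict.mk cs).getD q.1 false then q.2 else 0)).sum := by
  rw [calcA_eq_sum]
  induction cs with
  | nil =>
    simp [PySem.Dict.getD_eq_get?_getD, PySem.Dict.get?]
  | cons c cs ih =>
    simp only [List.map_cons, List.nodup_cons, List.mem_map] at hnd
    have hnotmem : ∀ q : String × Int, q.1 = c.1 →
        ((PySem.Dict.mk cs).getD q.1 false) = false := by
      intro q hq
      rw [hq, PySem.Dict.getD_eq_get?_getD]
      have hkm : c.1 ∉ (PySem.Dict.mk cs).keys := by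
        simp only [PySem.Dict.keys, List.mem_map]
        rintro ⟨a, ha, he⟩
        exact hnd.1 ⟨a, ha, he⟩
      have : (PySem.Dict.mk cs).get? c.1 = none :=
        (PySem.Dict.get?_eq_none_iff_not_mem_keys (PySem.Dict.mk cs) c.1).mpr hkm
      simp [this]
    have hB : (cciWeights.map
          (fun q => if (PySem.Dict.mk (c :: cs)).getD q.1 false then q.2 else 0)).sum
        = (cciWeights.map (fun q =>
            if c.1 = q.1 then (if c.2 then q.2 else 0)
            else (if (PySem.Dict.mk cs).getD q.1 false then q.2 else 0))).sum := by
      congr 1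
      apply List.map_congr_left
      intro q _
      rw [PySem.Dict.getD_eq_get?_getD, PySem.Dict.get?_mk_cons]
      by_cases hq : c.1 = q.1
      · simp [hq]
      · have : (c.1 == q.1) = false := by simpa using hq
        simp [hq, this, PySem.Dict.getD_eq_get?_getD]
    rw [hB, sum_key_split c.1 (fun v => if c.2 then v else 0) cciWeights
          (by decide)
          (fun q => if (PySem.Dict.mk cs).getD q.1 false then q.2 else 0)
          (fun q _ hq => by simp only []; rw [hnotmem q hq]; simp)]
    rw [List.map_cons, List.sum_cons, ih hnd.2]
    unfold cciDict
    by_cases hc : c.2 = true <;> by_cases hw : (PySem.Dict.mk cciWeights).contains c.1 = true <;>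
      simp [hc, hw] <;> ring

-- ===== VERDICT (by name: the statement is the Claim_ definition above) =====
theorem calculate_cci_score_spec : Claim_equal_calculate_cci_score := by
  intro cs _ hpre
  unfold Spec_calculate_cci_score
  rw [main_equiv cs hpre, calcB_eq_sum]
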